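-- pv_equiv track=rewrite | github.com/bircagsurgunu/adas2t-paper | eval_mls_eng_ensemble.py | _align_words
-- ===== SOURCE A (Python) =====
-- def _align_words(seq_a, seq_b):
--     """
--     DP align two word lists; returns list of pairs (a_word_or_None, b_word_or_None).
--     """
--     n, m = len(seq_a), len(seq_b)
--     dp = [[(0, []) for _ in range(m+1)] for _ in range(n+1)]
--     for i in range(1, n+1): dp[i][0] = (i, dp[i-1][0][1] + [(seq_a[i-1], None)])
--     for j in range(1, m+1): dp[0][j] = (j, dp[0][j-1][1] + [(None, seq_b[j-1])])
--     for i in range(1, n+1):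
--         for j in range(1, m+1):
--             if seq_a[i-1] == seq_b[j-1]:
--                 c, p = dp[i-1][j-1]
--                 dp[i][j] = (c, p + [(seq_a[i-1], seq_b[j-1])])
--             else:
--                 delc, delp = dp[i-1][j]
--                 insc, insp = dp[i][j-1]
--                 if delc <= insc:
--                     dp[i][j] = (delc+1, delp + [(seq_a[i-1], None)])
--                 else:
--                     dp[i][j] = (insc+1, insp + [(None, seq_b[j-1])])
--     return dp[n][m][1]
-- ===== SOURCE B (Python) =====
-- def _align_words(seq_a, seq_b):
--     """
--     Faster exact re-implementation: int-only cost matrix + single backtrack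
--     (O(n*m) total instead of copying path lists at every cell).
--     """
--     n, m = len(seq_a), len(seq_b)
--     rows = [list(range(m + 1))]
--     prev = rows[0]
--     for i in range(1, n + 1):
--         cur = [i] + [0] * m
--         for j in range(1, m + 1):
--             if seq_a[i - 1] == seq_b[j - 1]:
--                 cur[j] = prev[j - 1]
--             elif prev[j] <= cur[j - 1]:
--                 cur[j] = prev[j] + 1
--             else:
--                 cur[j] = cur[j - 1] + 1
--         rows.append(cur)
--         prev = cur
--     out = []
--     i, j = n, m
--     while i > 0 or j > 0:
--         if i > 0 and j > 0 and seq_a[i - 1] == seq_b[j - 1]: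
--             out.append((seq_a[i - 1], seq_b[j - 1])); i -= 1; j -= 1
--         elif i > 0 and (j == 0 or rows[i - 1][j] <= rows[i][j - 1]):
--             out.append((seq_a[i - 1], None)); i -= 1
--         else:
--             out.append((None, seq_b[j - 1])); j -= 1
--     out.reverse()
--     return out
-- ===== Notes on version B (the rewrite author's own statement) =====
-- stated objective: faster
-- what changed: Replaces the DP that stores a full alignment list in every cell (copied on each step) by an int-only cost matrix with a single backtracking pass that reconstructs the alignment once, using the same tie-breaking rule (diagonal on equality, delete when cost[i-1][j] <= cost[i][j-1]).
import Mathlib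
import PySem

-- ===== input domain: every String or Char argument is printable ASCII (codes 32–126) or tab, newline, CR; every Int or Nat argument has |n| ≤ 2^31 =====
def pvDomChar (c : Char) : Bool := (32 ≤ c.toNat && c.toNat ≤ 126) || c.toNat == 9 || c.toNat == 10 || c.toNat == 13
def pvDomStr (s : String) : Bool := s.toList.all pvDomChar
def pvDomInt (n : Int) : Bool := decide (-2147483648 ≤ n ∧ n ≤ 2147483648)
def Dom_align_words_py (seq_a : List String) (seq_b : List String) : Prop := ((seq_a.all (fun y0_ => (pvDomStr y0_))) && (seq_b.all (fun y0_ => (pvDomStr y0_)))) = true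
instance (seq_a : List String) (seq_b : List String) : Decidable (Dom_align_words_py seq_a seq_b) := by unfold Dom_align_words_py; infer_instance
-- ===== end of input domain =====

-- B replaces A's DP table that carries a full alignment list in every cell by an int-only cost
-- matrix plus one backtracking pass (objective: faster). Loop indices of range(1, n+1) are ported
-- as Nat; list indexing uses getD, exact here because every index the loops produce is in range.

-- ===== PORT A =====
-- dp[i][j] read / in-place write of A's list-of-lists table.
def pvGet2 (dp : List (List (Int × List (Option String × Option String)))) (i j : Nat) :
    Int × List (Option String × Option String) :=
  (dp.getD i []).getD j (0, [])

def pvSet2 (dp : List (List (Int × List (Option String × Option String)))) (i j : Nat)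
    (v : Int × List (Option String × Option String)) :
    List (List (Int × List (Option String × Option String))) :=
  dp.set i ((dp.getD i []).set j v)

-- dp = [[(0, []) for _ in range(m+1)] for _ in range(n+1)]
def pvDpInit (n m : Nat) : List (List (Int × List (Option String × Option String))) :=
  (List.range (n+1)).map (fun _ => (List.range (m+1)).map (fun _ => ((0 : Int), ([] : List (Option String × Option String)))))

-- for i in range(1, n+1): dp[i][0] = (i, dp[i-1][0][1] + [(seq_a[i-1], None)])
def pvStepCol (seq_a : List String) (dp : List (List (Int × List (Option String × Option String)))) (i : Nat) :
    List (List (Int × List (Option String × Option String))) :=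
  pvSet2 dp i 0 ((i : Int), (pvGet2 dp (i-1) 0).2 ++ [(some (seq_a.getD (i-1) ""), none)])

-- for j in range(1, m+1): dp[0][j] = (j, dp[0][j-1][1] + [(None, seq_b[j-1])])
def pvStepRow (seq_b : List String) (dp : List (List (Int × List (Option String × Option String)))) (j : Nat) :
    List (List (Int × List (Option String × Option String))) :=
  pvSet2 dp 0 j ((j : Int), (pvGet2 dp 0 (j-1)).2 ++ [(none, some (seq_b.getD (j-1) ""))])

-- body of the nested loop over j for a fixed i
def pvStepCell (seq_a seq_b : List String) (i : Nat)
    (dp : List (List (Int × List (Option String × Option String)))) (j : Nat) :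
    List (List (Int × List (Option String × Option String))) :=
  if seq_a.getD (i-1) "" = seq_b.getD (j-1) "" then
    pvSet2 dp i j ((pvGet2 dp (i-1) (j-1)).1,
      (pvGet2 dp (i-1) (j-1)).2 ++ [(some (seq_a.getD (i-1) ""), some (seq_b.getD (j-1) ""))])
  else
    if (pvGet2 dp (i-1) j).1 ≤ (pvGet2 dp i (j-1)).1 then
      pvSet2 dp i j ((pvGet2 dp (i-1) j).1 + 1,
        (pvGet2 dp (i-1) j).2 ++ [(some (seq_a.getD (i-1) ""), none)])
    else
      pvSet2 dp i j ((pvGet2 dp i (j-1)).1 + 1,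
        (pvGet2 dp i (j-1)).2 ++ [(none, some (seq_b.getD (j-1) ""))])

def align_words_py (seq_a : List String) (seq_b : List String) : List (Option String × Option String) :=
  (pvGet2
    ((List.range' 1 seq_a.length).foldl
      (fun dp i => (List.range' 1 seq_b.length).foldl (pvStepCell seq_a seq_b i) dp)
      ((List.range' 1 seq_b.length).foldl (pvStepRow seq_b)
        ((List.range' 1 seq_a.length).foldl (pvStepCol seq_a)
          (pvDpInit seq_a.length seq_b.length))))
    seq_a.length seq_b.length).2

-- ===== PORT B =====
-- rows = [list(range(m+1))]
def pvRow0 (m : Nat) : List Int := (List.range (m+1)).map (fun (j : Nat) => (j : Int))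

-- body of B's inner loop: cur[j] = prev[j-1] | prev[j]+1 | cur[j-1]+1
def pvRowStep (seq_a seq_b : List String) (prev : List Int) (i : Nat) (cur : List Int) (j : Nat) : List Int :=
  if seq_a.getD (i-1) "" = seq_b.getD (j-1) "" then
    cur.set j (prev.getD (j-1) 0)
  else
    if prev.getD j 0 ≤ cur.getD (j-1) 0 then cur.set j (prev.getD j 0 + 1)
    else cur.set j (cur.getD (j-1) 0 + 1)

-- body of B's outer loop: build cur from [i] + [0]*m, append it to rows, it becomes prev
def pvRowsStep (seq_a seq_b : List String) (st : List (List Int) × List Int) (i : Nat) :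
    List (List Int) × List Int :=
  let cur := (List.range' 1 seq_b.length).foldl (pvRowStep seq_a seq_b st.2 i)
    ((i : Int) :: List.replicate seq_b.length 0)
  (st.1 ++ [cur], cur)

def pvRowsB (seq_a seq_b : List String) : List (List Int) :=
  ((List.range' 1 seq_a.length).foldl (pvRowsStep seq_a seq_b)
    ([pvRow0 seq_b.length], pvRow0 seq_b.length)).1

-- B's while loop, appending to `out`; the caller reverses the result, as Source B does.
def pvBacktrack (seq_a : List String) (seq_b : List String) (rows : List (List Int)) :
    Nat → Nat → List (Option String × Option String) → List (Option String × Option String)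
  | 0, 0, out => out
  | i+1, 0, out => pvBacktrack seq_a seq_b rows i 0 (out ++ [(some (seq_a.getD i ""), none)])
  | 0, j+1, out => pvBacktrack seq_a seq_b rows 0 j (out ++ [(none, some (seq_b.getD j ""))])
  | i+1, j+1, out =>
      if seq_a.getD i "" = seq_b.getD j "" then
        pvBacktrack seq_a seq_b rows i j (out ++ [(some (seq_a.getD i ""), some (seq_b.getD j ""))])
      else
        if (rows.getD i []).getD (j+1) 0 ≤ (rows.getD (i+1) []).getD j 0 then
          pvBacktrack seq_a seq_b rows i (j+1) (out ++ [(some (seq_a.getD i ""), none)])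
        else
          pvBacktrack seq_a seq_b rows (i+1) j (out ++ [(none, some (seq_b.getD j ""))])

def align_words_py_alt (seq_a : List String) (seq_b : List String) : List (Option String × Option String) :=
  (pvBacktrack seq_a seq_b (pvRowsB seq_a seq_b) seq_a.length seq_b.length []).reverse

-- ===== PRECONDITION & SPEC =====
def Spec_align_words_py (seq_a : List String) (seq_b : List String) (out : List (Option String × Option String)) : Prop := out = align_words_py_alt seq_a seq_b
instance (seq_a : List String) (seq_b : List String) (out : List (Option String × Option String)) : Decidable (Spec_align_words_py seq_a seq_b out) := by unfold Spec_align_words_py; infer_instance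

-- ===== CLAIM (what is proved, stated in full; the proofs are below) =====
def Claim_equal_align_words_py : Prop := ∀ (seq_a : List String) (seq_b : List String), Dom_align_words_py seq_a seq_b → Spec_align_words_py seq_a seq_b (align_words_py seq_a seq_b)

-- ===== LEMMAS AND PROOFS =====

-- the recurrence both programs compute: cost and alignment of the prefix pair (i, j)
def pvF (a b : List String) : Nat → Nat → Int × List (Option String × Option String)
  | 0, 0 => (0, [])
  | i+1, 0 => (((i+1 : Nat) : Int), (pvF a b i 0).2 ++ [(some (a.getD i ""), none)])
  | 0, j+1 => (((j+1 : Nat) : Int), (pvF a b 0 j).2 ++ [(none, some (b.getD j ""))])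
  | i+1, j+1 =>
    if a.getD i "" = b.getD j "" then
      ((pvF a b i j).1, (pvF a b i j).2 ++ [(some (a.getD i ""), some (b.getD j ""))])
    else
      if (pvF a b i (j+1)).1 ≤ (pvF a b (i+1) j).1 then
        ((pvF a b i (j+1)).1 + 1, (pvF a b i (j+1)).2 ++ [(some (a.getD i ""), none)])
      else
        ((pvF a b (i+1) j).1 + 1, (pvF a b (i+1) j).2 ++ [(none, some (b.getD j ""))])
  termination_by i j => (i, j)

theorem pvF_00 (a b : List String) : pvF a b 0 0 = (0, []) := by simp [pvF]

theorem pvF_cost_left (a b : List String) (j : Nat) : (pvF a b 0 j).1 = (j : Int) := by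
  cases j <;> simp [pvF]

theorem pvF_cost_right (a b : List String) (i : Nat) : (pvF a b i 0).1 = (i : Int) := by
  cases i <;> simp [pvF]

theorem pvGetD_set_self {α : Type} (l : List α) (i : Nat) (v d : α) (h : i < l.length) :
    (l.set i v).getD i d = v := by
  simp [List.getD, h]

theorem pvGetD_set_ne {α : Type} (l : List α) (i i' : Nat) (v d : α) (h : i ≠ i') :
    (l.set i v).getD i' d = l.getD i' d := by
  simp [List.getD, List.getElem?_set_ne h]

-- shape of A's dp table
def pvShape (n m : Nat) (T : List (List (Int × List (Option String × Option String)))) : Prop :=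
  T.length = n + 1 ∧ ∀ r ∈ T, r.length = m + 1

theorem pvShape_set2 {n m : Nat} {T : List (List (Int × List (Option String × Option String)))}
    (i j : Nat) (v : Int × List (Option String × Option String)) (hS : pvShape n m T) :
    pvShape n m (pvSet2 T i j v) := by
  obtain ⟨h1, h2⟩ := hS
  by_cases hi : i < T.length
  · refine ⟨by simpa [pvSet2] using h1, ?_⟩
    intro r hr
    rcases List.mem_or_eq_of_mem_set hr with h | h
    · exact h2 r h
    · subst h
      rw [List.length_set]
      apply h2
      rw [List.getD_eq_getElem _ _ hi]; exact List.getElem_mem hi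
  · unfold pvSet2
    rw [List.set_eq_of_length_le (by omega)]
    exact ⟨h1, h2⟩

theorem pvGet2_set2_self {T : List (List (Int × List (Option String × Option String)))}
    {i j : Nat} (v : Int × List (Option String × Option String))
    (hi : i < T.length) (hj : j < (T.getD i []).length) :
    pvGet2 (pvSet2 T i j v) i j = v := by
  unfold pvGet2 pvSet2
  rw [pvGetD_set_self _ _ _ _ (by simpa using hi)]
  rw [pvGetD_set_self _ _ _ _ hj]

theorem pvGet2_set2_ne {T : List (List (Int × List (Option String × Option String)))}
    {i j i' j' : Nat} (v : Int × List (Option String × Option String))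
    (h : i ≠ i' ∨ j ≠ j') :
    pvGet2 (pvSet2 T i j v) i' j' = pvGet2 T i' j' := by
  unfold pvGet2 pvSet2
  by_cases hii : i = i'
  · subst hii
    have hjj : j ≠ j' := by tauto
    by_cases hi : i < T.length
    · rw [pvGetD_set_self _ _ _ _ (by simpa using hi)]
      rw [pvGetD_set_ne _ _ _ _ _ hjj]
    · rw [List.set_eq_of_length_le (le_of_not_gt (by simpa using hi))]
  · rw [pvGetD_set_ne _ _ _ _ _ hii]

theorem pvShape_init (n m : Nat) : pvShape n m (pvDpInit n m) := by
  constructor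
  · simp [pvDpInit]
  · intro r hr
    simp [pvDpInit] at hr
    obtain ⟨-, rfl⟩ := hr
    simp

theorem pvGetD_all_eq {α : Type} (l : List α) (d : α) (h : ∀ x ∈ l, x = d) (i : Nat) :
    l.getD i d = d := by
  rw [List.getD_eq_getElem?_getD]
  cases hx : l[i]? with
  | none => rfl
  | some x => simpa using h x (List.mem_of_getElem? hx)

theorem pvGet2_init (n m i j : Nat) : pvGet2 (pvDpInit n m) i j = (0, []) := by
  unfold pvGet2
  apply pvGetD_all_eq
  intro x hx
  rcases Nat.lt_or_ge i (pvDpInit n m).length with h | h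
  · have hmem : (pvDpInit n m).getD i [] ∈ pvDpInit n m := by
      rw [List.getD_eq_getElem _ _ h]; exact List.getElem_mem h
    unfold pvDpInit at hmem
    simp only [List.mem_map, List.mem_range] at hmem
    obtain ⟨t, -, hrow⟩ := hmem
    unfold pvDpInit at hx
    rw [← hrow] at hx
    simp only [List.mem_map, List.mem_range] at hx
    obtain ⟨u, -, hxe⟩ := hx
    exact hxe.symm
  · rw [List.getD_eq_getElem?_getD, List.getElem?_eq_none h] at hx
    simp at hx

-- invariant shape after the nested loops have processed rows 1..k completely
def pvG (a b : List String) (k i j : Nat) : Int × List (Option String × Option String) :=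
  if i ≤ a.length ∧ j ≤ b.length ∧ (i ≤ k ∨ j = 0) then pvF a b i j else (0, [])

-- first loop: column 0
theorem pvStage1 (a b : List String) (k : Nat) (hk : k ≤ a.length)
    (T : List (List (Int × List (Option String × Option String))))
    (hS : pvShape a.length b.length T)
    (hT : ∀ i j, pvGet2 T i j = (0, [])) :
    pvShape a.length b.length ((List.range' 1 k).foldl (pvStepCol a) T) ∧
    ∀ i j, pvGet2 ((List.range' 1 k).foldl (pvStepCol a) T) i j
      = if j = 0 ∧ i ≤ k then pvF a b i 0 else (0, []) := by
  induction k with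
  | zero =>
    refine ⟨hS, ?_⟩
    intro i j
    simp only [List.range'_zero, List.foldl_nil]
    rw [hT]
    split_ifs with h
    · have : i = 0 := by omega
      subst this
      rw [pvF_00]
    · rfl
  | succ k ih =>
    obtain ⟨ihS, ihT⟩ := ih (by omega)
    have hconcat : List.range' 1 (k+1) = List.range' 1 k ++ [1+k] := by
      have := List.range'_concat (s := 1) (n := k) (step := 1); simpa using this
    rw [hconcat]
    simp only [List.foldl_append, List.foldl_cons, List.foldl_nil, Nat.add_comm 1 k]
    set Tk := (List.range' 1 k).foldl (pvStepCol a) T with hTkdef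
    have hlen : Tk.length = a.length + 1 := ihS.1
    have hrow : (Tk.getD (k+1) []).length = b.length + 1 := by
      have hm : Tk.getD (k+1) [] ∈ Tk := by
        rw [List.getD_eq_getElem _ _ (by omega)]; exact List.getElem_mem (by omega)
      exact ihS.2 _ hm
    have hval : pvStepCol a Tk (k+1)
        = pvSet2 Tk (k+1) 0 (pvF a b (k+1) 0) := by
      unfold pvStepCol
      rw [show k + 1 - 1 = k from by omega, ihT k 0,
        if_pos (⟨rfl, Nat.le_refl k⟩ : (0:Nat) = 0 ∧ k ≤ k)]
      simp [pvF]
    rw [hval]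
    refine ⟨pvShape_set2 _ _ _ ihS, ?_⟩
    intro i j
    by_cases hij : i = k + 1 ∧ j = 0
    · obtain ⟨rfl, rfl⟩ := hij
      rw [pvGet2_set2_self _ (by omega) (by omega)]
      rw [if_pos ⟨rfl, Nat.le_refl _⟩]
    · rw [pvGet2_set2_ne _ (by omega), ihT i j]
      split_ifs with h1 h2 <;> first | rfl | omega

-- second loop: row 0
theorem pvStage2 (a b : List String) (k : Nat) (hk : k ≤ b.length)
    (T : List (List (Int × List (Option String × Option String))))
    (hS : pvShape a.length b.length T)
    (hT : ∀ i j, pvGet2 T i j = if j = 0 ∧ i ≤ a.length then pvF a b i 0 else (0, [])) :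
    pvShape a.length b.length ((List.range' 1 k).foldl (pvStepRow b) T) ∧
    ∀ i j, pvGet2 ((List.range' 1 k).foldl (pvStepRow b) T) i j
      = if i = 0 ∧ 1 ≤ j ∧ j ≤ k then pvF a b 0 j
        else if j = 0 ∧ i ≤ a.length then pvF a b i 0 else (0, []) := by
  induction k with
  | zero =>
    refine ⟨hS, ?_⟩
    intro i j
    simp only [List.range'_zero, List.foldl_nil]
    rw [hT]
    split_ifs with h <;> first | rfl | omega
  | succ k ih =>
    obtain ⟨ihS, ihT⟩ := ih (by omega)
    have hconcat : List.range' 1 (k+1) = List.range' 1 k ++ [1+k] := by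
      have := List.range'_concat (s := 1) (n := k) (step := 1); simpa using this
    rw [hconcat]
    simp only [List.foldl_append, List.foldl_cons, List.foldl_nil, Nat.add_comm 1 k]
    set Tk := (List.range' 1 k).foldl (pvStepRow b) T with hTkdef
    have hlen : Tk.length = a.length + 1 := ihS.1
    have hrow : (Tk.getD 0 []).length = b.length + 1 := by
      have hm : Tk.getD 0 [] ∈ Tk := by
        rw [List.getD_eq_getElem _ _ (by omega)]; exact List.getElem_mem (by omega)
      exact ihS.2 _ hm
    have hread : pvGet2 Tk 0 k = pvF a b 0 k := by
      rw [ihT 0 k]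
      split_ifs with h1 h2
      · rfl
      · rw [h2.1]
      · omega
    have hval : pvStepRow b Tk (k+1)
        = pvSet2 Tk 0 (k+1) (pvF a b 0 (k+1)) := by
      unfold pvStepRow
      rw [show k + 1 - 1 = k from by omega, hread]
      simp [pvF]
    rw [hval]
    refine ⟨pvShape_set2 _ _ _ ihS, ?_⟩
    intro i j
    by_cases hij : i = 0 ∧ j = k + 1
    · obtain ⟨rfl, rfl⟩ := hij
      rw [pvGet2_set2_self _ (by omega) (by omega)]
      rw [if_pos ⟨rfl, by omega, Nat.le_refl _⟩]
    · rw [pvGet2_set2_ne _ (by omega), ihT i j]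
      split_ifs with h1 h2 <;> first | rfl | omega

-- inner loop of the nested pass: row r, columns 1..l
theorem pvStage3Inner (a b : List String) (r : Nat) (hr1 : 1 ≤ r) (hrn : r ≤ a.length)
    (l : Nat) (hl : l ≤ b.length)
    (T : List (List (Int × List (Option String × Option String))))
    (hS : pvShape a.length b.length T)
    (hT : ∀ i j, pvGet2 T i j = pvG a b (r-1) i j) :
    pvShape a.length b.length ((List.range' 1 l).foldl (pvStepCell a b r) T) ∧
    ∀ i j, pvGet2 ((List.range' 1 l).foldl (pvStepCell a b r) T) i j
      = if i = r ∧ 1 ≤ j ∧ j ≤ l then pvF a b i j else pvG a b (r-1) i j := by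
  obtain ⟨s, rfl⟩ : ∃ s, r = s + 1 := ⟨r - 1, by omega⟩
  simp only [Nat.add_sub_cancel] at hT ⊢
  induction l with
  | zero =>
    refine ⟨hS, ?_⟩
    intro i j
    simp only [List.range'_zero, List.foldl_nil]
    rw [hT]
    split_ifs with h
    · omega
    · rfl
  | succ l ih =>
    obtain ⟨ihS, ihT⟩ := ih (by omega)
    have hconcat : List.range' 1 (l+1) = List.range' 1 l ++ [1+l] := by
      have := List.range'_concat (s := 1) (n := l) (step := 1); simpa using this
    rw [hconcat]
    simp only [List.foldl_append, List.foldl_cons, List.foldl_nil, Nat.add_comm 1 l]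
    set Tl := (List.range' 1 l).foldl (pvStepCell a b (s+1)) T with hTldef
    have hlen : Tl.length = a.length + 1 := ihS.1
    have hrow : (Tl.getD (s+1) []).length = b.length + 1 := by
      have hm : Tl.getD (s+1) [] ∈ Tl := by
        rw [List.getD_eq_getElem _ _ (by omega)]; exact List.getElem_mem (by omega)
      exact ihS.2 _ hm
    have hread1 : pvGet2 Tl s l = pvF a b s l := by
      rw [ihT s l]; unfold pvG
      split_ifs with h1 h2 <;> first | rfl | omega
    have hread2 : pvGet2 Tl s (l+1) = pvF a b s (l+1) := by
      rw [ihT s (l+1)]; unfold pvG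
      split_ifs with h1 h2 <;> first | rfl | omega
    have hread3 : pvGet2 Tl (s+1) l = pvF a b (s+1) l := by
      rw [ihT (s+1) l]; unfold pvG
      split_ifs with h1 h2 <;> first | rfl | omega
    have hval : pvStepCell a b (s+1) Tl (l+1)
        = pvSet2 Tl (s+1) (l+1) (pvF a b (s+1) (l+1)) := by
      unfold pvStepCell
      rw [show s + 1 - 1 = s from by omega, show l + 1 - 1 = l from by omega]
      rw [hread1, hread2, hread3]
      by_cases heq : a.getD s "" = b.getD l ""
      · have heq' : a[s]?.getD "" = b[l]?.getD "" := by
          simpa [List.getD_eq_getElem?_getD] using heq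
        rw [if_pos heq]
        have : pvF a b (s+1) (l+1)
            = ((pvF a b s l).1, (pvF a b s l).2 ++ [(some (a.getD s ""), some (b.getD l ""))]) := by
          simp [pvF, heq']
        rw [this]
      · have heq' : ¬ a[s]?.getD "" = b[l]?.getD "" := by
          simpa [List.getD_eq_getElem?_getD] using heq
        rw [if_neg heq]
        by_cases hcmp : (pvF a b s (l+1)).1 ≤ (pvF a b (s+1) l).1
        · rw [if_pos hcmp]
          have : pvF a b (s+1) (l+1)
              = ((pvF a b s (l+1)).1 + 1, (pvF a b s (l+1)).2 ++ [(some (a.getD s ""), none)]) := by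
            simp [pvF, heq', hcmp]
          rw [this]
        · rw [if_neg hcmp]
          have : pvF a b (s+1) (l+1)
              = ((pvF a b (s+1) l).1 + 1, (pvF a b (s+1) l).2 ++ [(none, some (b.getD l ""))]) := by
            simp [pvF, heq', hcmp]
          rw [this]
    rw [hval]
    refine ⟨pvShape_set2 _ _ _ ihS, ?_⟩
    intro i j
    by_cases hij : i = s + 1 ∧ j = l + 1
    · obtain ⟨rfl, rfl⟩ := hij
      rw [pvGet2_set2_self _ (by omega) (by omega)]
      rw [if_pos ⟨rfl, by omega, Nat.le_refl _⟩]
    · rw [pvGet2_set2_ne _ (by omega), ihT i j]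
      split_ifs with h1 h2 <;> first | rfl | omega

-- outer loop of the nested pass: rows 1..k
theorem pvStage3 (a b : List String) (k : Nat) (hk : k ≤ a.length)
    (T : List (List (Int × List (Option String × Option String))))
    (hS : pvShape a.length b.length T)
    (hT : ∀ i j, pvGet2 T i j = pvG a b 0 i j) :
    pvShape a.length b.length
      ((List.range' 1 k).foldl
        (fun dp i => (List.range' 1 b.length).foldl (pvStepCell a b i) dp) T) ∧
    ∀ i j, pvGet2 ((List.range' 1 k).foldl
        (fun dp i => (List.range' 1 b.length).foldl (pvStepCell a b i) dp) T) i j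
      = pvG a b k i j := by
  induction k with
  | zero =>
    exact ⟨hS, fun i j => hT i j⟩
  | succ k ih =>
    obtain ⟨ihS, ihT⟩ := ih (by omega)
    have hconcat : List.range' 1 (k+1) = List.range' 1 k ++ [1+k] := by
      have := List.range'_concat (s := 1) (n := k) (step := 1); simpa using this
    rw [hconcat]
    simp only [List.foldl_append, List.foldl_cons, List.foldl_nil, Nat.add_comm 1 k]
    have hT' : ∀ i j, pvGet2 ((List.range' 1 k).foldl
        (fun dp i => (List.range' 1 b.length).foldl (pvStepCell a b i) dp) T) i j
        = pvG a b ((k+1)-1) i j := by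
      simpa only [Nat.add_sub_cancel] using ihT
    obtain ⟨hS', hchar⟩ := pvStage3Inner a b (k+1) (by omega) (by omega) b.length (Nat.le_refl _) _ ihS hT'
    refine ⟨hS', ?_⟩
    intro i j
    rw [hchar i j]
    simp only [Nat.add_sub_cancel]
    unfold pvG
    split_ifs with h1 h2 h3 <;> first | rfl | omega

theorem pvA_eq (a b : List String) : align_words_py a b = (pvF a b a.length b.length).2 := by
  obtain ⟨hS1, hT1⟩ := pvStage1 a b a.length (Nat.le_refl _) _ (pvShape_init a.length b.length)
    (pvGet2_init a.length b.length)
  obtain ⟨hS2, hT2⟩ := pvStage2 a b b.length (Nat.le_refl _) _ hS1 hT1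
  have hT2' : ∀ i j, pvGet2 ((List.range' 1 b.length).foldl (pvStepRow b)
      ((List.range' 1 a.length).foldl (pvStepCol a) (pvDpInit a.length b.length))) i j
      = pvG a b 0 i j := by
    intro i j
    rw [hT2 i j]
    unfold pvG
    by_cases h1 : i = 0 ∧ 1 ≤ j ∧ j ≤ b.length
    · rw [if_pos h1, if_pos (by omega), h1.1]
    · rw [if_neg h1]
      by_cases h2 : j = 0 ∧ i ≤ a.length
      · rw [if_pos h2, if_pos (by omega), h2.1]
      · rw [if_neg h2, if_neg (by omega)]
  obtain ⟨hS3, hT3⟩ := pvStage3 a b a.length (Nat.le_refl _) _ hS2 hT2'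
  unfold align_words_py
  rw [hT3 a.length b.length]
  unfold pvG
  rw [if_pos ⟨Nat.le_refl _, Nat.le_refl _, Or.inl (Nat.le_refl _)⟩]

-- ===== B side =====

-- row i of the cost matrix
def pvRowF (a b : List String) (i : Nat) : List Int :=
  (List.range (b.length+1)).map (fun j => (pvF a b i j).1)

theorem pvRowF_getD (a b : List String) (i j : Nat) (hj : j ≤ b.length) :
    (pvRowF a b i).getD j 0 = (pvF a b i j).1 := by
  unfold pvRowF
  rw [List.getD_eq_getElem?_getD]
  simp [Nat.lt_succ_of_le hj]

theorem pvRow0_eq (a b : List String) : pvRow0 b.length = pvRowF a b 0 := by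
  unfold pvRow0 pvRowF
  apply List.ext_getElem
  · simp
  · intro t h1 h2
    simp only [List.getElem_map, List.getElem_range]
    rw [pvF_cost_left]

theorem pvGetD_replicate_zero (m t : Nat) : (List.replicate m (0:Int)).getD t 0 = 0 := by
  rw [List.getD_eq_getElem?_getD]
  by_cases h : t < m
  · simp [h]
  · rw [List.getElem?_eq_none (by simpa [Nat.not_lt, List.length_replicate] using h)]
    rfl

-- B's inner loop builds row s+1 left to right
theorem pvRowChar (a b : List String) (s : Nat) (_hs : s + 1 ≤ a.length)
    (l : Nat) (hl : l ≤ b.length) :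
    ((List.range' 1 l).foldl (pvRowStep a b (pvRowF a b s) (s+1))
      (((s+1 : Nat) : Int) :: List.replicate b.length 0)).length = b.length + 1 ∧
    ∀ j, j ≤ b.length →
      ((List.range' 1 l).foldl (pvRowStep a b (pvRowF a b s) (s+1))
        (((s+1 : Nat) : Int) :: List.replicate b.length 0)).getD j 0
      = if j ≤ l then (pvF a b (s+1) j).1 else 0 := by
  induction l with
  | zero =>
    simp only [List.range'_zero, List.foldl_nil]
    refine ⟨by simp, ?_⟩
    intro j hj
    cases j with
    | zero =>
      rw [if_pos (Nat.le_refl _), pvF_cost_right]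
      rfl
    | succ t =>
      rw [if_neg (by omega)]
      show (List.replicate b.length (0:Int)).getD t 0 = 0
      exact pvGetD_replicate_zero _ _
  | succ l ih =>
    obtain ⟨ihLen, ihChar⟩ := ih (by omega)
    have hconcat : List.range' 1 (l+1) = List.range' 1 l ++ [1+l] := by
      have := List.range'_concat (s := 1) (n := l) (step := 1); simpa using this
    rw [hconcat]
    simp only [List.foldl_append, List.foldl_cons, List.foldl_nil, Nat.add_comm 1 l]
    set cur := (List.range' 1 l).foldl (pvRowStep a b (pvRowF a b s) (s+1))
      (((s+1 : Nat) : Int) :: List.replicate b.length 0) with hcurdef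
    have hread1 : (pvRowF a b s).getD l 0 = (pvF a b s l).1 :=
      pvRowF_getD a b s l (by omega)
    have hread2 : (pvRowF a b s).getD (l+1) 0 = (pvF a b s (l+1)).1 :=
      pvRowF_getD a b s (l+1) (by omega)
    have hread3 : cur.getD l 0 = (pvF a b (s+1) l).1 := by
      rw [ihChar l (by omega), if_pos (Nat.le_refl _)]
    have hval : pvRowStep a b (pvRowF a b s) (s+1) cur (l+1)
        = cur.set (l+1) ((pvF a b (s+1) (l+1)).1) := by
      unfold pvRowStep
      rw [show s + 1 - 1 = s from by omega, show l + 1 - 1 = l from by omega]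
      rw [hread1, hread2, hread3]
      by_cases heq : a.getD s "" = b.getD l ""
      · have heq' : a[s]?.getD "" = b[l]?.getD "" := by
          simpa [List.getD_eq_getElem?_getD] using heq
        rw [if_pos heq]
        have : (pvF a b (s+1) (l+1)).1 = (pvF a b s l).1 := by simp [pvF, heq']
        rw [this]
      · have heq' : ¬ a[s]?.getD "" = b[l]?.getD "" := by
          simpa [List.getD_eq_getElem?_getD] using heq
        rw [if_neg heq]
        by_cases hcmp : (pvF a b s (l+1)).1 ≤ (pvF a b (s+1) l).1
        · rw [if_pos hcmp]
          have : (pvF a b (s+1) (l+1)).1 = (pvF a b s (l+1)).1 + 1 := by simp [pvF, heq', hcmp]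
          rw [this]
        · rw [if_neg hcmp]
          have : (pvF a b (s+1) (l+1)).1 = (pvF a b (s+1) l).1 + 1 := by simp [pvF, heq', hcmp]
          rw [this]
    rw [hval]
    refine ⟨by simpa using ihLen, ?_⟩
    intro j hj
    by_cases hjl : j = l + 1
    · subst hjl
      rw [pvGetD_set_self _ _ _ _ (by omega), if_pos (Nat.le_refl _)]
    · rw [pvGetD_set_ne _ _ _ _ _ (by omega), ihChar j hj]
      split_ifs with h1 h2 <;> first | rfl | omega

-- B's outer loop: after k rows, rows = [cost row 0 .. cost row k], prev = cost row k
theorem pvRowsAux (a b : List String) (k : Nat) (hk : k ≤ a.length) :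
    (List.range' 1 k).foldl (pvRowsStep a b) ([pvRow0 b.length], pvRow0 b.length)
      = ((List.range (k+1)).map (pvRowF a b), pvRowF a b k) := by
  induction k with
  | zero =>
    simp only [List.range'_zero, List.foldl_nil]
    rw [pvRow0_eq a b]
    simp [List.range_succ]
  | succ k ih =>
    have hconcat : List.range' 1 (k+1) = List.range' 1 k ++ [1+k] := by
      have := List.range'_concat (s := 1) (n := k) (step := 1); simpa using this
    rw [hconcat]
    simp only [List.foldl_append, List.foldl_cons, List.foldl_nil, Nat.add_comm 1 k]
    rw [ih (by omega)]
    unfold pvRowsStep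
    simp only []
    obtain ⟨hLen, hChar⟩ := pvRowChar a b k (by omega) b.length (Nat.le_refl _)
    have hcur : (List.range' 1 b.length).foldl (pvRowStep a b (pvRowF a b k) (k+1))
        (((k+1 : Nat) : Int) :: List.replicate b.length 0) = pvRowF a b (k+1) := by
      apply List.ext_getElem
      · rw [hLen]; simp [pvRowF]
      · intro t h1 h2
        rw [← List.getD_eq_getElem _ 0 h1]
        rw [hChar t (by rw [hLen] at h1; omega), if_pos (by rw [hLen] at h1; omega)]
        simp [pvRowF]
    rw [hcur]
    conv_rhs => rw [List.range_succ, List.map_append]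
    rfl

theorem pvRowsB_getD (a b : List String) (i j : Nat) (hi : i ≤ a.length) (hj : j ≤ b.length) :
    ((pvRowsB a b).getD i []).getD j 0 = (pvF a b i j).1 := by
  unfold pvRowsB
  rw [pvRowsAux a b a.length (Nat.le_refl _)]
  have : ((List.range (a.length+1)).map (pvRowF a b)).getD i [] = pvRowF a b i := by
    rw [List.getD_eq_getElem?_getD]
    simp [Nat.lt_succ_of_le hi]
  rw [this, pvRowF_getD a b i j hj]

theorem pvBack_spec (a b : List String) (N : Nat) :
    ∀ i j out, i + j ≤ N → i ≤ a.length → j ≤ b.length →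
      pvBacktrack a b (pvRowsB a b) i j out = out ++ (pvF a b i j).2.reverse := by
  induction N with
  | zero =>
    intro i j out h _ _
    have hi : i = 0 := by omega
    have hj : j = 0 := by omega
    subst hi; subst hj
    simp [pvBacktrack, pvF_00]
  | succ N ih =>
    intro i j out h hi hj
    cases i with
    | zero =>
      cases j with
      | zero => simp [pvBacktrack, pvF_00]
      | succ j =>
        rw [show pvBacktrack a b (pvRowsB a b) 0 (j+1) out
            = pvBacktrack a b (pvRowsB a b) 0 j (out ++ [(none, some (b.getD j ""))]) from by
          simp only [pvBacktrack]]
        rw [ih 0 j _ (by omega) (by omega) (by omega)]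
        have : (pvF a b 0 (j+1)).2 = (pvF a b 0 j).2 ++ [(none, some (b.getD j ""))] := by
          simp [pvF]
        rw [this]
        simp
    | succ i =>
      cases j with
      | zero =>
        rw [show pvBacktrack a b (pvRowsB a b) (i+1) 0 out
            = pvBacktrack a b (pvRowsB a b) i 0 (out ++ [(some (a.getD i ""), none)]) from by
          simp only [pvBacktrack]]
        rw [ih i 0 _ (by omega) (by omega) (by omega)]
        have : (pvF a b (i+1) 0).2 = (pvF a b i 0).2 ++ [(some (a.getD i ""), none)] := by
          simp [pvF]
        rw [this]
        simp
      | succ j =>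
        rw [show pvBacktrack a b (pvRowsB a b) (i+1) (j+1) out
            = if a.getD i "" = b.getD j "" then
                pvBacktrack a b (pvRowsB a b) i j (out ++ [(some (a.getD i ""), some (b.getD j ""))])
              else
                if ((pvRowsB a b).getD i []).getD (j+1) 0 ≤ ((pvRowsB a b).getD (i+1) []).getD j 0 then
                  pvBacktrack a b (pvRowsB a b) i (j+1) (out ++ [(some (a.getD i ""), none)])
                else
                  pvBacktrack a b (pvRowsB a b) (i+1) j (out ++ [(none, some (b.getD j ""))]) from by
          simp only [pvBacktrack]]
        rw [pvRowsB_getD a b i (j+1) (by omega) (by omega),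
            pvRowsB_getD a b (i+1) j (by omega) (by omega)]
        by_cases heq : a.getD i "" = b.getD j ""
        · have heq' : a[i]?.getD "" = b[j]?.getD "" := by
            simpa [List.getD_eq_getElem?_getD] using heq
          rw [if_pos heq, ih i j _ (by omega) (by omega) (by omega)]
          have : (pvF a b (i+1) (j+1)).2
              = (pvF a b i j).2 ++ [(some (a.getD i ""), some (b.getD j ""))] := by
            simp [pvF, heq']
          rw [this]
          simp
        · have heq' : ¬ a[i]?.getD "" = b[j]?.getD "" := by
            simpa [List.getD_eq_getElem?_getD] using heq
          rw [if_neg heq]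
          by_cases hcmp : (pvF a b i (j+1)).1 ≤ (pvF a b (i+1) j).1
          · rw [if_pos hcmp, ih i (j+1) _ (by omega) (by omega) (by omega)]
            have : (pvF a b (i+1) (j+1)).2
                = (pvF a b i (j+1)).2 ++ [(some (a.getD i ""), none)] := by
              simp [pvF, heq', hcmp]
            rw [this]
            simp
          · rw [if_neg hcmp, ih (i+1) j _ (by omega) (by omega) (by omega)]
            have : (pvF a b (i+1) (j+1)).2
                = (pvF a b (i+1) j).2 ++ [(none, some (b.getD j ""))] := by
              simp [pvF, heq', hcmp]
            rw [this]
            simp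

theorem pvB_eq (a b : List String) : align_words_py_alt a b = (pvF a b a.length b.length).2 := by
  unfold align_words_py_alt
  rw [pvBack_spec a b (a.length + b.length) a.length b.length [] (Nat.le_refl _)
    (Nat.le_refl _) (Nat.le_refl _)]
  simp

-- ===== VERDICT (by name: the statement is the Claim_ definition above) =====
theorem align_words_py_spec : Claim_equal_align_words_py := by
  intro seq_a seq_b _
  unfold Spec_align_words_py
  rw [pvA_eq, pvB_eq]
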